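-- pv_equiv track=rewrite | github.com/Thealexaed/test_crossword | functions/crossword_plotter.py | set_letters
-- ===== SOURCE A (Python) =====
-- def set_letters(list_word, word_except):
--   set_letter = set()
--   list_except = list_word.copy()
--   list_except.remove(word_except)
--   for word in list_except:
--     for letter in word:
--       set_letter.add(letter)
--   return len(set(word_except) & set_letter)
-- ===== SOURCE B (Python) =====
-- def set_letters(list_word, word_except):
--   i = list_word.index(word_except)
--   rest = list_word[:i] + list_word[i+1:]
--   return sum(1 for c in set(word_except) if any(c in w for w in rest))
-- ===== Notes on version B (the rewrite author's own statement) =====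
-- stated objective: alternative
-- what changed: Instead of building the union set of all letters of the other words and intersecting it with set(word_except), B locates word_except by index, splices it out, and counts each distinct letter of word_except by rescanning the remaining words for membership; no union set is maintained.
import Mathlib
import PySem

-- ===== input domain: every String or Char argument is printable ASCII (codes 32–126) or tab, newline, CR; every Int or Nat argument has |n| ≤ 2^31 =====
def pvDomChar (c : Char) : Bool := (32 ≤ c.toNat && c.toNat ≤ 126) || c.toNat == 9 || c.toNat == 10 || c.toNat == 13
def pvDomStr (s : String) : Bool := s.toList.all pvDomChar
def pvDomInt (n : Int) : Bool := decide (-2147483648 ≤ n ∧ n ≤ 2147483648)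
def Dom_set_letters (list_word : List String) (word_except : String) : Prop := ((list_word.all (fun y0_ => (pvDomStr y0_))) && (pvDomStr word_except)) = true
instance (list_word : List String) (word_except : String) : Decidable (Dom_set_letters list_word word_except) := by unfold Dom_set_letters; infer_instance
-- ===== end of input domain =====

-- B locates word_except by index, splices it out, and rescans the remaining words per distinct
-- letter of word_except, instead of A's "accumulate the union set of all letters, then intersect"
-- (objective: alternative, same cost class).

-- ===== PORT A =====
-- list_except = list_word.copy(); list_except.remove(word_except) — remove? is none exactly
-- where Python raises ValueError (excluded by Pre_).
def set_letters (list_word : List String) (word_except : String) : Int :=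
  match PySem.List.remove? list_word word_except with
  | none => 0   -- unreachable under Pre_: Python raises ValueError here
  | some list_except =>
    let set_letter : PySem.Set Char :=
      list_except.foldl (fun s w => w.toList.foldl PySem.Set.add s) PySem.Set.empty
    (PySem.Set.len (PySem.Set.inter (PySem.Set.ofList word_except.toList) set_letter) : Int)

-- ===== PORT B =====
def set_letters_alt (list_word : List String) (word_except : String) : Int :=
  match PySem.List.index? list_word word_except with
  | none => 0   -- unreachable under Pre_: Python raises ValueError here
  | some i =>
    let rest : List String :=
      PySem.List.slice list_word none (some (i : Int)) ++
        PySem.List.slice list_word (some ((i : Int) + 1)) none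
    (PySem.Set.ofList word_except.toList).foldl
      (fun acc c => if rest.any (fun w => w.toList.contains c) then acc + 1 else acc) (0 : Int)

-- ===== PRECONDITION & SPEC =====
-- Pre_ excludes exactly the inputs where both Pythons raise ValueError (word_except not in list_word).
def Pre_set_letters (list_word : List String) (word_except : String) : Prop :=
  word_except ∈ list_word
instance (list_word : List String) (word_except : String) : Decidable (Pre_set_letters list_word word_except) := by unfold Pre_set_letters; infer_instance

def pvWitness_set_letters : List String × String := (["ab", "bc"], "bc")

def Spec_set_letters (list_word : List String) (word_except : String) (out : Int) : Prop := out = set_letters_alt list_word word_except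
instance (list_word : List String) (word_except : String) (out : Int) : Decidable (Spec_set_letters list_word word_except out) := by unfold Spec_set_letters; infer_instance

-- ===== CLAIM (what is proved, stated in full; the proofs are below) =====
def Claim_equal_set_letters : Prop := ∀ (list_word : List String) (word_except : String), Dom_set_letters list_word word_except → Pre_set_letters list_word word_except → Spec_set_letters list_word word_except (set_letters list_word word_except)

-- ===== LEMMAS AND PROOFS =====

-- membership in A's accumulated letter set: a letter is there iff some word of ws contains it
theorem mem_letter_fold (ws : List String) (s : PySem.Set Char) (c : Char) :
    c ∈ ws.foldl (fun s w => w.toList.foldl PySem.Set.add s) s ↔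
      c ∈ s ∨ ∃ w ∈ ws, c ∈ w.toList := by
  induction ws generalizing s with
  | nil => simp
  | cons x xs ih =>
    have hadd : ∀ (cs : List Char) (t : PySem.Set Char),
        c ∈ cs.foldl PySem.Set.add t ↔ c ∈ t ∨ c ∈ cs := by
      intro cs
      induction cs with
      | nil => simp
      | cons y ys ihy => intro t; simp [List.foldl, ihy, PySem.Set.mem_add]; tauto
    simp [List.foldl, ih, hadd]; tauto

-- A's intersection count = B's per-letter count, once both see the same remaining words
theorem counts_agree (rest : List String) (we : String) :
    (PySem.Set.len (PySem.Set.inter (PySem.Set.ofList we.toList)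
        (rest.foldl (fun s w => w.toList.foldl PySem.Set.add s) PySem.Set.empty)) : Int) =
      (PySem.Set.ofList we.toList).foldl
        (fun acc c => if rest.any (fun w => w.toList.contains c) then acc + 1 else acc) (0 : Int) := by
  rw [PySem.List.foldl_count_if]
  have h1 : PySem.Set.len (PySem.Set.inter (PySem.Set.ofList we.toList)
      (rest.foldl (fun s w => w.toList.foldl PySem.Set.add s) PySem.Set.empty)) =
      (PySem.Set.ofList we.toList).countP
        (fun c => PySem.Set.contains
          (rest.foldl (fun s w => w.toList.foldl PySem.Set.add s) PySem.Set.empty) c) := by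
    rw [List.countP_eq_length_filter]; rfl
  rw [h1, List.countP_congr, zero_add]
  intro c _
  rw [Bool.eq_iff_iff]
  simp [PySem.Set.contains, mem_letter_fold, PySem.Set.empty]

-- list_word with the first occurrence of word_except removed (A's remove) equals B's two slices
theorem remove_eq_splice (lw : List String) (we : String) (k : Nat)
    (hidx : PySem.List.index? lw we = some k) (hpre : we ∈ lw) :
    PySem.List.remove? lw we = some (PySem.List.slice lw none (some (k : Int)) ++
      PySem.List.slice lw (some ((k : Int) + 1)) none) := by
  obtain ⟨pre, suf, hdecomp, hlen, hnot⟩ := (PySem.List.index?_eq_some_iff lw we k).mp hidx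
  have hslice1 : PySem.List.slice lw none (some (k : Int)) = pre := by
    rw [PySem.List.slice_to_natCast, hdecomp, ← hlen, List.take_left]
  have hslice2 : PySem.List.slice lw (some ((k : Int) + 1)) none = suf := by
    have h1 : ((k : Int) + 1) = ((k + 1 : Nat) : Int) := by push_cast; ring
    have h2 : lw = (pre ++ [we]) ++ suf := by simp [hdecomp]
    rw [h1, PySem.List.slice_from_natCast, h2, List.drop_left' (by simp [hlen])]
  rw [hslice1, hslice2, PySem.List.remove?_eq_some_erase lw we hpre, hdecomp,
    List.erase_append_right _ (by simpa using hnot), List.erase_cons_head]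

-- ===== VERDICT (by name: the statement is the Claim_ definition above) =====
theorem set_letters_spec : Claim_equal_set_letters := by
  intro lw we _ hpre
  unfold Spec_set_letters
  cases hidx : PySem.List.index? lw we with
  | none => exact absurd ((PySem.List.index?_eq_none_iff lw we).mp hidx) (by simpa using hpre)
  | some k =>
    simp only [set_letters, set_letters_alt, hidx, remove_eq_splice lw we k hidx hpre]
    exact counts_agree _ we
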